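-- pv_equiv track=rewrite | github.com/SoleneChiche/bgp_analysis | slidingWindowCountCalculation.py | count_window
-- ===== SOURCE A (Python) =====
-- window = 120
--
-- def count_window(index, points, peer, type):
--     cnt = 0
--     if type == 'A':
--         for i in range(index - window, index):
--             if i in points[peer]:
--                 cnt += points[peer][i]['A']
--             else:
--                 pass
--     else:
--         for i in range(index - window, index):
--             if i in points[peer]:
--                 cnt += points[peer][i]['W']
--             else:
--                 pass
--     return cnt
-- ===== SOURCE B (Python) =====
-- window = 120
--
-- def count_window(index, points, peer, type):
--     key = 'A' if type == 'A' else 'W'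
--     lo = index - window
--     total = 0
--     for i, rec in points[peer].items():
--         if lo <= i < index:
--             total += rec[key]
--     return total
-- ===== Notes on version B (the rewrite author's own statement) =====
-- stated objective: idiomatic
-- what changed: B selects the 'A'/'W' key once and iterates over the dict's actual items with a range test, instead of A's two duplicated loops scanning all 120 window indices with a membership test and a fresh lookup per hit.
import Mathlib
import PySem

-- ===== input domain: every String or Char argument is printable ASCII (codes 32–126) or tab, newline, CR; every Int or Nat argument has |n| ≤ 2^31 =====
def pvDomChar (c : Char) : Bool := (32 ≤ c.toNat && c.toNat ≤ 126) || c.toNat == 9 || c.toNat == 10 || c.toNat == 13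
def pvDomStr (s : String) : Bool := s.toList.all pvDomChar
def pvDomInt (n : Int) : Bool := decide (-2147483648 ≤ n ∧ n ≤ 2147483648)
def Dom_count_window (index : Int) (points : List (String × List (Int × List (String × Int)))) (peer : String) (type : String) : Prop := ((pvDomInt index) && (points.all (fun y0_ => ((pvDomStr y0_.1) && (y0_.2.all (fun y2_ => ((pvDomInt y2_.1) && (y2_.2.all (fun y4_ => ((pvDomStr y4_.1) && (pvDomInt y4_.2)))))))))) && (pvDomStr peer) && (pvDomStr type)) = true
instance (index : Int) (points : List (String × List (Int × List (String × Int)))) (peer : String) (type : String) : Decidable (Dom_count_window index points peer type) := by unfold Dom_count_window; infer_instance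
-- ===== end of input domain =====

-- B iterates once over the dict's stored items with a range test (key picked once),
-- instead of A's two duplicated loops probing all 120 window indices; same return value on Pre_.

-- shared helper: Python dict lookup d[k] on the association-list representation (first match)
def pyLookup {α β : Type} [BEq α] (l : List (α × β)) (k : α) : Option β :=
  match l with
  | [] => none
  | (a, b) :: t => if a == k then some b else pyLookup t k

-- ===== PORT A =====
def count_window (index : Int) (points : List (String × List (Int × List (String × Int)))) (peer : String) (type : String) : Int :=
  -- points[peer]: KeyError (excluded by Pre_) modelled by the [] default
  let d := (pyLookup points peer).getD []
  if type == "A" then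
    (PySem.List.pyRange (index - 120) index 1).foldl
      (fun cnt i =>
        if (pyLookup d i).isSome then
          cnt + ((pyLookup ((pyLookup d i).getD []) "A").getD 0)  -- missing 'A' (KeyError) excluded by Pre_
        else cnt) 0
  else
    (PySem.List.pyRange (index - 120) index 1).foldl
      (fun cnt i =>
        if (pyLookup d i).isSome then
          cnt + ((pyLookup ((pyLookup d i).getD []) "W").getD 0)  -- missing 'W' (KeyError) excluded by Pre_
        else cnt) 0

-- ===== PORT B =====
def count_window_alt (index : Int) (points : List (String × List (Int × List (String × Int)))) (peer : String) (type : String) : Int :=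
  let key := if type == "A" then "A" else "W"
  let lo := index - 120
  ((pyLookup points peer).getD []).foldl
    (fun total p =>
      if lo ≤ p.1 ∧ p.1 < index then total + ((pyLookup p.2 key).getD 0) else total) 0

-- ===== PRECONDITION & SPEC =====
-- Pre_ excludes the inputs on which Python A raises KeyError (peer absent, or a record inside the
-- window missing the selected 'A'/'W' key) and association lists whose inner keys are duplicated,
-- which do not represent any Python dict.
def Pre_count_window (index : Int) (points : List (String × List (Int × List (String × Int)))) (peer : String) (type : String) : Prop :=
  peer ∈ points.map (·.1) ∧
  ∀ q ∈ points, q.1 = peer →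
    (q.2.map (·.1)).Nodup ∧
    ∀ p ∈ q.2, index - 120 ≤ p.1 → p.1 < index →
      (if type == "A" then "A" else "W") ∈ p.2.map (·.1)
instance (index : Int) (points : List (String × List (Int × List (String × Int)))) (peer : String) (type : String) : Decidable (Pre_count_window index points peer type) := by unfold Pre_count_window; infer_instance

def pvWitness_count_window : Int × (List (String × List (Int × List (String × Int)))) × String × String :=
  (2, [("p", [(1, [("A", 3), ("W", 1)])])], "p", "A")

def Spec_count_window (index : Int) (points : List (String × List (Int × List (String × Int)))) (peer : String) (type : String) (out : Int) : Prop := out = count_window_alt index points peer type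
instance (index : Int) (points : List (String × List (Int × List (String × Int)))) (peer : String) (type : String) (out : Int) : Decidable (Spec_count_window index points peer type out) := by unfold Spec_count_window; infer_instance

-- ===== CLAIM (what is proved, stated in full; the proofs are below) =====
def Claim_equal_count_window : Prop := ∀ (index : Int) (points : List (String × List (Int × List (String × Int)))) (peer : String) (type : String), Dom_count_window index points peer type → Pre_count_window index points peer type → Spec_count_window index points peer type (count_window index points peer type)

-- ===== LEMMAS AND PROOFS =====

-- a successful lookup returns a stored pair
theorem pyLookup_mem {α β : Type} [BEq α] [LawfulBEq α] (l : List (α × β)) (k : α) (v : β)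
    (h : pyLookup l k = some v) : (k, v) ∈ l := by
  induction l with
  | nil => simp [pyLookup] at h
  | cons p t ih =>
    obtain ⟨a, b⟩ := p
    simp only [pyLookup] at h
    by_cases hak : a == k
    · rw [if_pos hak] at h
      obtain rfl := Option.some.inj h
      obtain rfl := eq_of_beq hak
      exact List.mem_cons_self
    · rw [if_neg hak] at h
      exact List.mem_cons_of_mem _ (ih h)

-- a key not among the stored keys looks up to none
theorem pyLookup_eq_none {β : Type} (l : List (Int × β)) (k : Int)
    (h : k ∉ l.map (·.1)) : pyLookup l k = none := by
  induction l with
  | nil => rfl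
  | cons p t ih =>
    simp only [List.map_cons, List.mem_cons, not_or] at h
    simp only [pyLookup]
    rw [if_neg (by simpa using Ne.symm h.1), ih h.2]

-- the per-index contribution A reads at index i
def wVal (d : List (Int × List (String × Int))) (key : String) (i : Int) : Int :=
  match pyLookup d i with
  | some rec => (pyLookup rec key).getD 0
  | none => 0

theorem sum_map_ite_zero (R : List Int) (g : Int → Int) (k x : Int)
    (hR : R.Nodup) (hg : g k = 0) :
    (R.map (fun i => if k = i then x else g i)).sum = (R.map g).sum + (if k ∈ R then x else 0) := by
  induction R with
  | nil => simp
  | cons a t ih =>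
    have ht : t.Nodup := hR.of_cons
    by_cases hka : k = a
    · subst hka
      have hkt : k ∉ t := (List.nodup_cons.mp hR).1
      have : (t.map (fun i => if k = i then x else g i)).sum = (t.map g).sum := by
        have : ∀ i ∈ t, (if k = i then x else g i) = g i := by
          intro i hi
          rw [if_neg]; rintro rfl; exact hkt hi
        rw [List.map_congr_left this]
      simp [this, hg]
      ring
    · simp only [List.map_cons, List.sum_cons, if_neg hka, ih ht, List.mem_cons]
      have : (k ∈ t → k = a ∨ k ∈ t) ∧ (k = a ∨ k ∈ t → k ∈ t) := by
        constructor
        · exact fun h => Or.inr h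
        · rintro (h | h); exact absurd h hka; exact h
      by_cases hkt : k ∈ t
      · rw [if_pos hkt, if_pos (Or.inr hkt)]; ring
      · rw [if_neg hkt, if_neg (by rintro (h | h); exact hka h; exact hkt h)]; ring

-- main bridge: summing A's per-index reads over any duplicate-free index list R equals
-- summing the stored records whose index lies in R
theorem sum_wVal_eq (d : List (Int × List (String × Int))) (key : String) (R : List Int)
    (hR : R.Nodup) (hd : (d.map (·.1)).Nodup) :
    (R.map (wVal d key)).sum
      = ((d.filter (fun p => decide (p.1 ∈ R))).map (fun p => (pyLookup p.2 key).getD 0)).sum := by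
  induction d with
  | nil =>
    have h0 : ∀ i ∈ R, wVal [] key i = 0 := fun i _ => rfl
    rw [List.map_congr_left h0]; simp
  | cons p t ih =>
    obtain ⟨k, rec⟩ := p
    simp only [List.map_cons, List.nodup_cons] at hd
    have hnone : pyLookup t k = none := pyLookup_eq_none t k hd.1
    have hw : ∀ i, wVal ((k, rec) :: t) key i = if k = i then (pyLookup rec key).getD 0 else wVal t key i := by
      intro i
      by_cases hki : k = i
      · subst hki; simp [wVal, pyLookup]
      · rw [if_neg hki]
        have hstep : pyLookup ((k, rec) :: t) i = pyLookup t i := by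
          simp only [pyLookup]; rw [if_neg (by simpa using hki)]
        unfold wVal
        rw [hstep]
    have hgk : wVal t key k = 0 := by simp [wVal, hnone]
    calc (R.map (wVal ((k, rec) :: t) key)).sum
        = (R.map (fun i => if k = i then (pyLookup rec key).getD 0 else wVal t key i)).sum := by
          rw [List.map_congr_left (fun i _ => hw i)]
      _ = (R.map (wVal t key)).sum + (if k ∈ R then (pyLookup rec key).getD 0 else 0) := by
          exact sum_map_ite_zero R (wVal t key) k _ hR hgk
      _ = _ := by
          rw [ih hd.2]
          by_cases hkR : k ∈ R
          · simp [hkR]; ring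
          · simp [hkR]

-- A's loop (for a fixed key) folds to the sum of wVal over the range
theorem foldA_eq_sum (d : List (Int × List (String × Int))) (key : String) (a b : Int) :
    (PySem.List.pyRange a b 1).foldl
        (fun cnt i =>
          if (pyLookup d i).isSome then
            cnt + ((pyLookup ((pyLookup d i).getD []) key).getD 0)
          else cnt) 0
      = ((PySem.List.pyRange a b 1).map (wVal d key)).sum := by
  have h : ∀ (c : Int) (i : Int),
      (if (pyLookup d i).isSome then c + ((pyLookup ((pyLookup d i).getD []) key).getD 0) else c)
        = c + wVal d key i := by
    intro c i
    cases h : pyLookup d i <;> simp [wVal, h]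
  calc _ = (PySem.List.pyRange a b 1).foldl (fun c i => c + wVal d key i) 0 := by
        apply PySem.List.foldl_congr_mem
        intro c i _
        exact h c i
    _ = _ := by
        rw [PySem.List.foldl_add]; simp

-- B's loop folds to the sum over the filtered stored items
theorem foldB_eq_sum (d : List (Int × List (String × Int))) (key : String) (a b : Int) :
    d.foldl (fun total p => if a ≤ p.1 ∧ p.1 < b then total + ((pyLookup p.2 key).getD 0) else total) 0
      = ((d.filter (fun p => decide (p.1 ∈ PySem.List.pyRange a b 1))).map
          (fun p => (pyLookup p.2 key).getD 0)).sum := by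
  rw [PySem.List.foldl_ite_eq_foldl_filter]
  rw [PySem.List.foldl_add]
  have : (d.filter fun p => decide (a ≤ p.1 ∧ p.1 < b))
      = d.filter (fun p => decide (p.1 ∈ PySem.List.pyRange a b 1)) := by
    apply List.filter_congr
    intro p _
    simp [PySem.List.mem_pyRange_one]
  rw [this]; simp

-- ===== VERDICT (by name: the statement is the Claim_ definition above) =====
theorem count_window_spec : Claim_equal_count_window := by
  intro index points peer type _ hpre
  obtain ⟨-, hall⟩ := hpre
  have hnodup : (((pyLookup points peer).getD []).map (·.1)).Nodup := by
    cases h : pyLookup points peer with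
    | none => simp
    | some d => simpa using (hall (peer, d) (pyLookup_mem points peer d h) rfl).1
  unfold Spec_count_window count_window count_window_alt
  set d := (pyLookup points peer).getD [] with hd
  have key_eq : ∀ key : String,
      (PySem.List.pyRange (index - 120) index 1).foldl
        (fun cnt i =>
          if (pyLookup d i).isSome then
            cnt + ((pyLookup ((pyLookup d i).getD []) key).getD 0)
          else cnt) 0
      = d.foldl (fun total p => if index - 120 ≤ p.1 ∧ p.1 < index then total + ((pyLookup p.2 key).getD 0) else total) 0 := by
    intro key
    rw [foldA_eq_sum, foldB_eq_sum,
      sum_wVal_eq d key _ (PySem.List.nodup_pyRange_one (index - 120) index) hnodup]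
  by_cases ht : (type == "A") = true
  · rw [if_pos ht]
    simpa [ht] using key_eq "A"
  · rw [if_neg ht]
    simpa [ht] using key_eq "W"
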